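-- pv_equiv track=rewrite | github.com/gcomneno/pet | src/pet/families.py | make_disjoint
-- ===== SOURCE A (Python) =====
-- def make_disjoint(families_raw):
--     assigned = set()
--     result = {}
--     for name, members in families_raw.items():
--         exclusive = [m for m in members if m not in assigned]
--         assigned.update(exclusive)
--         if exclusive:
--             result[name] = exclusive
--     return result
-- ===== SOURCE B (Python) =====
-- def make_disjoint(families_raw):
--     # Two-pass: first index each member by the first family that claims it,
--     # then rebuild each family's exclusive member list from that index.
--     owner = {}
--     for name, members in families_raw.items():
--         for m in members:
--             if m not in owner:
--                 owner[m] = name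
--     result = {}
--     for name, members in families_raw.items():
--         mine = [m for m in members if owner[m] == name]
--         if mine:
--             result[name] = mine
--     return result
-- ===== Notes on version B (the rewrite author's own statement) =====
-- stated objective: alternative
-- what changed: Replaces the single pass with a running assigned-set by a two-pass structure: first build an owner index mapping each member to the first family claiming it, then rebuild each family's list by filtering against that index; Pre_ only excludes association lists with duplicate family names, which do not denote a Python dict (the parameter is a dict, so no Python-level input is excluded).
import Mathlib
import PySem

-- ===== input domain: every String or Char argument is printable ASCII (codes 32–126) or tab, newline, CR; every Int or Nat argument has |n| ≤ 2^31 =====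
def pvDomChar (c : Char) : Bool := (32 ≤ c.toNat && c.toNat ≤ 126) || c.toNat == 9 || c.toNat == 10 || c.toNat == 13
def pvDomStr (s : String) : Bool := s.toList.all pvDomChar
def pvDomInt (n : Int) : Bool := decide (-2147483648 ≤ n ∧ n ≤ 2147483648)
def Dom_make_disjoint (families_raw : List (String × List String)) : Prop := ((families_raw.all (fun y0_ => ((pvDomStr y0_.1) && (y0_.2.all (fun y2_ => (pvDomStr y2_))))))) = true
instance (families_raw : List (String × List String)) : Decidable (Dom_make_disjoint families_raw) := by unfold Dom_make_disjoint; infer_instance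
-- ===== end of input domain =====

-- B re-decomposes A's single assigned-set pass into an owner-index pass plus a rebuild pass; same outputs, same cost (objective: alternative).

-- ===== PORT A =====
-- one loop step of A: filter members not yet assigned, extend the assigned set, record non-empty lists
def mdStepA (st : PySem.Set String × PySem.Dict String (List String))
    (p : String × List String) : PySem.Set String × PySem.Dict String (List String) :=
  let exclusive := p.2.filter (fun m => !(PySem.Set.contains st.1 m))
  let assigned := PySem.Set.update st.1 exclusive
  let result := if !exclusive.isEmpty then st.2.insert p.1 exclusive else st.2
  (assigned, result)

def make_disjoint (families_raw : List (String × List String)) : List (String × List String) :=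
  ((families_raw.foldl mdStepA (PySem.Set.empty, PySem.Dict.empty)).2).items

-- ===== PORT B =====
-- first pass of B: owner[m] = name of the first family containing m
def mdOwner (families_raw : List (String × List String)) : PySem.Dict String String :=
  families_raw.foldl
    (fun own p => p.2.foldl
      (fun own m => if own.contains m then own else own.insert m p.1) own)
    PySem.Dict.empty

-- second pass of B: rebuild each family's list from the owner index
def mdStepB (owner : PySem.Dict String String)
    (res : PySem.Dict String (List String)) (p : String × List String) :
    PySem.Dict String (List String) :=
  let mine := p.2.filter (fun m => owner.get? m == some p.1)
  if !mine.isEmpty then res.insert p.1 mine else res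

def make_disjoint_alt (families_raw : List (String × List String)) : List (String × List String) :=
  let owner := mdOwner families_raw
  (families_raw.foldl (mdStepB owner) PySem.Dict.empty).items

-- ===== PRECONDITION & SPEC =====
-- A's parameter is a Python dict: an association list with duplicate family names does not
-- denote a dict (dict construction overwrites earlier entries), so only Nodup keys are claimed.
def Pre_make_disjoint (families_raw : List (String × List String)) : Prop :=
  (families_raw.map Prod.fst).Nodup
instance (families_raw : List (String × List String)) : Decidable (Pre_make_disjoint families_raw) := by unfold Pre_make_disjoint; infer_instance

def pvWitness_make_disjoint : (List (String × List String)) :=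
  [("a", ["x", "y", "x"]), ("b", ["y", "z"]), ("c", ["z"]), ("d", [])]

def Spec_make_disjoint (families_raw : List (String × List String)) (out : List (String × List String)) : Prop := out = make_disjoint_alt families_raw
instance (families_raw : List (String × List String)) (out : List (String × List String)) : Decidable (Spec_make_disjoint families_raw out) := by unfold Spec_make_disjoint; infer_instance

-- ===== CLAIM (what is proved, stated in full; the proofs are below) =====
def Claim_equal_make_disjoint : Prop := ∀ (families_raw : List (String × List String)), Dom_make_disjoint families_raw → Pre_make_disjoint families_raw → Spec_make_disjoint families_raw (make_disjoint families_raw)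

-- ===== LEMMAS AND PROOFS =====

-- the name of the first family in l that contains m (a pure characterisation of B's owner index)
def firstOwn (l : List (String × List String)) (m : String) : Option String :=
  match l with
  | [] => none
  | p :: t => if m ∈ p.2 then some p.1 else firstOwn t m

theorem firstOwn_append (l₁ l₂ : List (String × List String)) (m : String) :
    firstOwn (l₁ ++ l₂) m = (firstOwn l₁ m).or (firstOwn l₂ m) := by
  induction l₁ with
  | nil => simp [firstOwn]
  | cons p t ih =>
    by_cases h : m ∈ p.2 <;> simp [firstOwn, h, ih]

theorem firstOwn_mem_keys (l : List (String × List String)) (m q : String)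
    (h : firstOwn l m = some q) : q ∈ l.map Prod.fst := by
  induction l with
  | nil => simp [firstOwn] at h
  | cons p t ih =>
    by_cases hm : m ∈ p.2
    · simp [firstOwn, hm] at h; simp [h]
    · simp [firstOwn, hm] at h
      exact List.mem_cons_of_mem _ (ih h)

-- B's inner loop over one family's members, characterised on get?
theorem mdOwner_inner (members : List String) (name : String)
    (own : PySem.Dict String String) (m : String) :
    ((members.foldl (fun own m => if own.contains m then own else own.insert m name) own).get? m)
      = (own.get? m).or (if m ∈ members then some name else none) := by
  induction members generalizing own with
  | nil => simp
  | cons x t ih =>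
    simp only [List.foldl_cons]
    by_cases hc : own.contains x
    · rw [if_pos hc, ih]
      by_cases hx : m = x
      · subst hx
        have : (own.get? m).isSome := by
          cases hg : own.get? m with
          | none => rw [PySem.Dict.get?_eq_none_iff_contains] at hg; simp [hg] at hc
          | some v => simp
        cases hg : own.get? m with
        | none => simp [hg] at this
        | some v => simp [List.mem_cons]
      · simp [List.mem_cons, hx]
    · rw [if_neg hc, ih]
      by_cases hx : m = x
      · subst hx
        rw [PySem.Dict.get?_insert_self]
        have hg : own.get? m = none := by
          rw [PySem.Dict.get?_eq_none_iff_contains]; simpa using hc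
        simp [hg, List.mem_cons]
      · rw [PySem.Dict.get?_insert_of_ne own name hx]
        simp [List.mem_cons, hx]

-- B's owner fold, characterised on get? by firstOwn
theorem mdOwner_get? (l : List (String × List String)) (own : PySem.Dict String String) (m : String) :
    (l.foldl (fun own p => p.2.foldl
        (fun own m => if own.contains m then own else own.insert m p.1) own) own).get? m
      = (own.get? m).or (firstOwn l m) := by
  induction l generalizing own with
  | nil => simp [firstOwn]
  | cons p t ih =>
    simp only [List.foldl_cons]
    rw [ih, mdOwner_inner]
    by_cases hm : m ∈ p.2 <;> cases hg : own.get? m <;> simp [firstOwn, hm, hg]  -- (hg needed in the some-branches)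

-- main invariant: with the assigned set matching the members of the processed prefix,
-- the rest of A's fold produces the same dict as the rest of B's second fold
theorem md_main (fr : List (String × List String)) (hnd : (fr.map Prod.fst).Nodup) :
    ∀ (rest pre : List (String × List String)) (S : PySem.Set String)
      (R : PySem.Dict String (List String)),
      pre ++ rest = fr →
      (∀ m, PySem.Set.contains S m = (firstOwn pre m).isSome) →
      (rest.foldl mdStepA (S, R)).2 = rest.foldl (mdStepB (mdOwner fr)) R := by
  intro rest
  induction rest with
  | nil => intro pre S R _ _; simp
  | cons p t ih =>
    intro pre S R hsplit hS
    simp only [List.foldl_cons]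
    have hkey : p.1 ∉ pre.map Prod.fst := by
      have h2 := hnd
      rw [← hsplit] at h2
      simp only [List.map_append, List.map_cons] at h2
      rcases List.nodup_append.mp h2 with ⟨-, -, hdisj⟩
      intro hmem
      exact hdisj p.1 hmem p.1 (by simp) rfl
    -- the two filter conditions agree on members of p.2
    have hfilt : p.2.filter (fun m => !(PySem.Set.contains S m))
        = p.2.filter (fun m => (mdOwner fr).get? m == some p.1) := by
      apply List.filter_congr
      intro m hm
      have hget : (mdOwner fr).get? m = (firstOwn pre m).or (some p.1) := by
        unfold mdOwner
        rw [mdOwner_get?, ← hsplit, firstOwn_append]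
        simp [firstOwn, hm]
      rw [hS m, hget]
      cases hfo : firstOwn pre m with
      | none => simp
      | some q =>
        have hq : q ≠ p.1 := by
          intro he; subst he
          exact hkey (firstOwn_mem_keys pre m _ hfo)
        simp [hq]
    have hstep : mdStepA (S, R) p = (PySem.Set.update S (p.2.filter (fun m => !(PySem.Set.contains S m))),
        mdStepB (mdOwner fr) R p) := by
      simp only [mdStepA, mdStepB, hfilt]
    rw [hstep]
    apply ih (pre ++ [p])
    · simpa using hsplit
    · intro m
      rw [firstOwn_append]
      have hmu : PySem.Set.contains (PySem.Set.update S (p.2.filter (fun m => !(PySem.Set.contains S m)))) m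
          = (PySem.Set.contains S m || decide (m ∈ p.2)) := by
        have hup : m ∈ PySem.Set.update S (p.2.filter (fun m => !(PySem.Set.contains S m)))
            ↔ m ∈ S ∨ m ∈ p.2.filter (fun m => !(PySem.Set.contains S m)) :=
          PySem.Set.mem_update _ _ _
        rw [Bool.eq_iff_iff, PySem.Set.contains_iff, hup]
        simp only [List.mem_filter, Bool.not_eq_eq_eq_not, Bool.not_true,
          ← PySem.Set.contains_iff S m, Bool.or_eq_true, decide_eq_true_eq]
        cases PySem.Set.contains S m <;> simp
      rw [hmu, hS m]
      cases hfo : firstOwn pre m with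
      | none => by_cases hmp : m ∈ p.2 <;> simp [firstOwn, hmp]
      | some q => simp

-- ===== VERDICT (by name: the statement is the Claim_ definition above) =====
theorem make_disjoint_spec : Claim_equal_make_disjoint := by
  intro fr _ hpre
  unfold Spec_make_disjoint make_disjoint make_disjoint_alt
  have := md_main fr hpre fr [] PySem.Set.empty PySem.Dict.empty (by simp)
    (by intro m; simp [firstOwn, PySem.Set.contains, PySem.Set.empty])
  rw [this]
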